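-- pv_equiv track=rewrite | github.com/cyeh015/gopest | gopest/obs_def.py | target_times
-- ===== SOURCE A (Python) =====
-- def target_times(desired_times, limit, data):
--     """ work out target times (among desired_times) that has data within +-
--     limit """
--     def count_valid(time, limit, data):
--         """ Assuming data is a list of tuple (t,y), count how many t is
--         within the range of time +- limit. """
--         i = 0
--         for t,y in data:
--             if (time-limit) <= t <= (time+limit):
--                 i += 1
--         return i
--     targets = []
--     for time in desired_times:
--         if count_valid(time, limit, data):
--             targets.append(time)
--     return targets
-- ===== SOURCE B (Python) =====
-- def target_times(desired_times, limit, data):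
--     """ work out target times (among desired_times) that has data within +-
--     limit -- sort the data t-values once, then binary-search each desired
--     time's window instead of scanning all data per time. """
--     ts = sorted(t for t, _ in data)
--     n = len(ts)
--     targets = []
--     for time in desired_times:
--         # bisect_left(ts, time - limit), hand-written (no imports allowed here)
--         x = time - limit
--         lo, hi = 0, n
--         while lo < hi:
--             mid = (lo + hi) // 2
--             if ts[mid] < x:
--                 lo = mid + 1
--             else:
--                 hi = mid
--         if lo < n and ts[lo] <= time + limit:
--             targets.append(time)
--     return targets
-- ===== Notes on version B (the rewrite author's own statement) =====
-- stated objective: faster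
-- what changed: B sorts the data t-values once and answers each desired time by a bisect_left binary search for the left edge of its window, instead of A's full scan of data (counting matches) for every desired time.
import Mathlib
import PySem

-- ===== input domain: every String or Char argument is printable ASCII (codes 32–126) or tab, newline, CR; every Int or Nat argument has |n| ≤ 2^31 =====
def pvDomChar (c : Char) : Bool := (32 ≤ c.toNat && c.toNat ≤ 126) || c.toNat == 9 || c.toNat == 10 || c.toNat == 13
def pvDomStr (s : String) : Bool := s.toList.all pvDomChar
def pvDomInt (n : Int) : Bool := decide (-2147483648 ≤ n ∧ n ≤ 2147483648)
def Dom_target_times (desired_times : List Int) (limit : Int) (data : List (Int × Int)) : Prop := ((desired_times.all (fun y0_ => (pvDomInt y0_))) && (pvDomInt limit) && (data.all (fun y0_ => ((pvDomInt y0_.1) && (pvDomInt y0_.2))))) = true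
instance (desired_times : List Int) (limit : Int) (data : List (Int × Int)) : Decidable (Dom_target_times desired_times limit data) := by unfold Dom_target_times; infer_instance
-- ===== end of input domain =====

-- B sorts the data t-values once and binary-searches each desired time's window,
-- replacing A's full scan of data per desired time (objective: faster).

-- ===== PORT A =====
-- inner helper count_valid: scan data, count t within time ± limit
def countValid (time : Int) (limit : Int) (data : List (Int × Int)) : Int :=
  data.foldl (fun i ty => if time - limit ≤ ty.1 ∧ ty.1 ≤ time + limit then i + 1 else i) 0

def target_times (desired_times : List Int) (limit : Int) (data : List (Int × Int)) : List Int :=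
  desired_times.foldl (fun targets time =>
    if countValid time limit data ≠ 0 then targets ++ [time] else targets) []

-- ===== PORT B =====
-- Source B's hand-written lo/hi loop is exactly bisect_left's algorithm (it may not
-- import bisect, since A imports nothing); ported as PySem.List.bisectLeft, the
-- prelude's bisect_left, which is that same loop — exact.
def target_times_alt (desired_times : List Int) (limit : Int) (data : List (Int × Int)) : List Int :=
  let ts := PySem.List.sorted (data.map Prod.fst) (fun t => t) false
  let n := ts.length
  desired_times.foldl (fun targets time =>
    let lo := PySem.List.bisectLeft ts (time - limit)
    -- 'lo < n and ts[lo] <= time + limit': ts[lo] only read when lo < n, so getD is exact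
    if lo < n ∧ ts.getD lo 0 ≤ time + limit then targets ++ [time] else targets) []

-- ===== PRECONDITION & SPEC =====
def Spec_target_times (desired_times : List Int) (limit : Int) (data : List (Int × Int)) (out : List Int) : Prop := out = target_times_alt desired_times limit data
instance (desired_times : List Int) (limit : Int) (data : List (Int × Int)) (out : List Int) : Decidable (Spec_target_times desired_times limit data out) := by unfold Spec_target_times; infer_instance

-- ===== CLAIM (what is proved, stated in full; the proofs are below) =====
def Claim_equal_target_times : Prop := ∀ (desired_times : List Int) (limit : Int) (data : List (Int × Int)), Dom_target_times desired_times limit data → Spec_target_times desired_times limit data (target_times desired_times limit data)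

-- ===== LEMMAS AND PROOFS =====

-- A's counter is nonzero iff some data point lies in the window
theorem countValid_ne_zero_iff (time limit : Int) (data : List (Int × Int)) :
    countValid time limit data ≠ 0 ↔
      ∃ p ∈ data, time - limit ≤ p.1 ∧ p.1 ≤ time + limit := by
  unfold countValid
  rw [show (fun (i : Int) (ty : Int × Int) =>
        if time - limit ≤ ty.1 ∧ ty.1 ≤ time + limit then i + 1 else i)
      = (fun (i : Int) (ty : Int × Int) =>
        if (decide (time - limit ≤ ty.1 ∧ ty.1 ≤ time + limit)) then i + 1 else i) by
      funext i ty; simp]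
  rw [PySem.List.foldl_count_if]
  simp [List.countP_eq_zero, not_forall]

-- B's test is equivalent: on the sorted t-list, bisect_left finds a window element iff one exists
theorem bisect_test_iff (ts : List Int) (hs : ts.Pairwise (· ≤ ·)) (x hi : Int) :
    (PySem.List.bisectLeft ts x < ts.length ∧ ts.getD (PySem.List.bisectLeft ts x) 0 ≤ hi) ↔
      ∃ t ∈ ts, x ≤ t ∧ t ≤ hi := by
  obtain ⟨hle, hlt, hge⟩ := PySem.List.bisectLeft_spec ts x hs
  set lo := PySem.List.bisectLeft ts x with hlo
  constructor
  · rintro ⟨h1, h2⟩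
    refine ⟨ts[lo], List.getElem_mem h1, hge lo h1 le_rfl, ?_⟩
    rwa [List.getD_eq_getElem ts 0 h1] at h2
  · rintro ⟨t, ht, hxt, hthi⟩
    obtain ⟨j, hj, rfl⟩ := List.getElem_of_mem ht
    have hloj : lo ≤ j := by
      by_contra h
      exact absurd hxt (not_le.mpr (hlt j hj (by omega)))
    have h1 : lo < ts.length := lt_of_le_of_lt hloj hj
    refine ⟨h1, ?_⟩
    rw [List.getD_eq_getElem ts 0 h1]
    calc ts[lo] ≤ ts[j] := by
          rcases lt_or_eq_of_le hloj with h | h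
          · exact (List.pairwise_iff_getElem.mp hs) lo j h1 hj h
          · simp [h]
      _ ≤ hi := hthi

theorem target_times_eq_filter (desired_times : List Int) (limit : Int) (data : List (Int × Int)) :
    target_times desired_times limit data
      = desired_times.filter (fun time => decide (countValid time limit data ≠ 0)) := by
  unfold target_times
  rw [PySem.List.foldl_append_ite_eq_filter]
  simp

theorem target_times_alt_eq_filter (desired_times : List Int) (limit : Int) (data : List (Int × Int)) :
    target_times_alt desired_times limit data
      = desired_times.filter (fun time => decide
          (PySem.List.bisectLeft (PySem.List.sorted (data.map Prod.fst) (fun t => t) false) (time - limit)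
              < (PySem.List.sorted (data.map Prod.fst) (fun t => t) false).length ∧
            (PySem.List.sorted (data.map Prod.fst) (fun t => t) false).getD
              (PySem.List.bisectLeft (PySem.List.sorted (data.map Prod.fst) (fun t => t) false) (time - limit)) 0
              ≤ time + limit)) := by
  unfold target_times_alt
  rw [PySem.List.foldl_append_ite_eq_filter]
  simp

-- ===== VERDICT (by name: the statement is the Claim_ definition above) =====
theorem target_times_spec : Claim_equal_target_times := by
  intro desired_times limit data _
  unfold Spec_target_times
  rw [target_times_eq_filter, target_times_alt_eq_filter]
  apply List.filter_congr
  intro time _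
  simp only [decide_eq_decide]
  rw [countValid_ne_zero_iff,
      bisect_test_iff _ (PySem.List.sorted_pairwise (data.map Prod.fst) (fun t => t)) _ _]
  constructor
  · rintro ⟨p, hp, h1, h2⟩
    exact ⟨p.1, (PySem.List.mem_sorted _ _ _ _).mpr (List.mem_map_of_mem hp), h1, h2⟩
  · rintro ⟨t, ht, h1, h2⟩
    obtain ⟨p, hp, rfl⟩ := List.mem_map.mp ((PySem.List.mem_sorted _ _ _ _).mp ht)
    exact ⟨p, hp, h1, h2⟩
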